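-- pv_equiv track=rewrite | github.com/brain-bzh/metric_driven_few_shot_nas | pkg/utils/misc_utils.py | merge_rankings
-- ===== SOURCE A (Python) =====
-- def merge_rankings(list_rankings):
--     #merges all rankings in list_rankings on the basis of similar identifiers
--     #identifier that does not have a ranking in all rankings is dropped
--     merged_ranking = {}
--     ref = list_rankings[0]
--     for id in ref.keys():
--         is_in_all_rankings = True
--         for ranking in list_rankings[1:]:
--             if id not in ranking:
--                 is_in_all_rankings = False
--         if is_in_all_rankings==True:
--             merged_ranking[id] = [ranking[id] for ranking in list_rankings]
--     return(merged_ranking)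
-- ===== SOURCE B (Python) =====
-- def merge_rankings(list_rankings):
--     # Build the set of ids common to all rankings first, then filter the
--     # reference ranking once (keeps its insertion order).
--     common = set(list_rankings[0])
--     for ranking in list_rankings[1:]:
--         common &= set(ranking)
--     return {id: [ranking[id] for ranking in list_rankings]
--             for id in list_rankings[0] if id in common}
-- ===== Notes on version B (the rewrite author's own statement) =====
-- stated objective: simpler
-- what changed: Replaces A's per-id scan of list_rankings[1:] (with a manually maintained boolean flag and dict insertions) by one set-intersection pass computing the common ids up front, followed by a single filtering dict comprehension over the reference ranking.
import Mathlib
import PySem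

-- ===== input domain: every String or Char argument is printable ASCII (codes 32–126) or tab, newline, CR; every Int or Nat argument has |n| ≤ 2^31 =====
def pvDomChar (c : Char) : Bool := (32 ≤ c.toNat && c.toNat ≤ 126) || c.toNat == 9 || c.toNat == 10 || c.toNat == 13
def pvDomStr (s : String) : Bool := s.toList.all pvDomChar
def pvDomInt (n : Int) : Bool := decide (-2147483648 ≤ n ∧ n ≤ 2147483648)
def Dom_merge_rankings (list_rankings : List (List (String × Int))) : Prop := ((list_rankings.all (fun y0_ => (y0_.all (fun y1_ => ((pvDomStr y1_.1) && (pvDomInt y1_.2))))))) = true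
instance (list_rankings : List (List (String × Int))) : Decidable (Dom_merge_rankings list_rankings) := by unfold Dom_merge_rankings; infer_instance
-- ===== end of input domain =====

-- B builds the set of ids common to all rankings first and then filters the reference
-- ranking once, replacing A's per-id nested membership scan (objective: simpler).


-- ===== PORT A =====
-- A: ref = list_rankings[0]; for each id in ref.keys(): scan list_rankings[1:]
-- maintaining a boolean flag; if the flag stayed True, insert id with the list of values.
def merge_rankings (list_rankings : List (List (String × Int))) : List (String × List Int) :=
  let dicts := list_rankings.map PySem.Dict.ofList
  match dicts with
  | [] => []   -- unreachable: Pre_ excludes [], where Python raises IndexError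
  | ref :: _ =>
    ((PySem.Dict.keys ref).foldl
      (fun (merged : PySem.Dict String (List Int)) id =>
        let is_in_all_rankings :=
          (PySem.List.slice dicts (some 1) none).foldl
            (fun b ranking => if PySem.Dict.contains ranking id then b else false) true
        if is_in_all_rankings = true then
          merged.insert id (dicts.map (fun ranking => ranking.getD id 0))
        else merged)
      PySem.Dict.empty).items

-- ===== PORT B =====
-- B: intersect the key-sets of all rankings, then one filtering dict comprehension over ref.
def merge_rankings_alt (list_rankings : List (List (String × Int))) : List (String × List Int) :=
  let dicts := list_rankings.map PySem.Dict.ofList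
  match dicts with
  | [] => []   -- unreachable: Pre_ excludes [], where Python raises IndexError
  | ref :: rest =>
    let common : PySem.Set String :=
      rest.foldl (fun s ranking => PySem.Set.inter s (PySem.Dict.keys ranking))
        (PySem.Set.ofList (PySem.Dict.keys ref))
    (((PySem.Dict.keys ref).filter (fun id => PySem.Set.contains common id)).foldl
      (fun (d : PySem.Dict String (List Int)) id =>
        d.insert id (dicts.map (fun ranking => ranking.getD id 0)))
      PySem.Dict.empty).items

-- ===== PRECONDITION & SPEC =====
-- Pre_ excludes only the empty list, on which Python A raises IndexError (list_rankings[0]).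
def Pre_merge_rankings (list_rankings : List (List (String × Int))) : Prop :=
  list_rankings ≠ []
instance (list_rankings : List (List (String × Int))) : Decidable (Pre_merge_rankings list_rankings) := by unfold Pre_merge_rankings; infer_instance

def pvWitness_merge_rankings : (List (List (String × Int))) :=
  [[("a", 1), ("b", 2)], [("b", 5), ("a", 3)]]

def Spec_merge_rankings (list_rankings : List (List (String × Int))) (out : List (String × List Int)) : Prop := out = merge_rankings_alt list_rankings
instance (list_rankings : List (List (String × Int))) (out : List (String × List Int)) : Decidable (Spec_merge_rankings list_rankings out) := by unfold Spec_merge_rankings; infer_instance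

-- ===== CLAIM (what is proved, stated in full; the proofs are below) =====
def Claim_equal_merge_rankings : Prop := ∀ (list_rankings : List (List (String × Int))), Dom_merge_rankings list_rankings → Pre_merge_rankings list_rankings → Spec_merge_rankings list_rankings (merge_rankings list_rankings)

-- ===== LEMMAS AND PROOFS =====

-- A's inner flag loop is List.all.
theorem flag_foldl_eq_all (l : List (PySem.Dict String Int)) (id : String) (b : Bool) :
    l.foldl (fun b ranking => if PySem.Dict.contains ranking id then b else false) b
      = (b && l.all (fun ranking => PySem.Dict.contains ranking id)) := by
  induction l generalizing b with
  | nil => simp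
  | cons r l ih =>
    simp only [List.foldl_cons, List.all_cons]
    rcases h : PySem.Dict.contains r id with _ | _
    · rw [if_neg (by simp [h]), ih]; simp
    · rw [if_pos (by simp [h]), ih]; simp [h]

-- membership in B's iterated intersection
theorem mem_foldl_inter (l : List (PySem.Dict String Int)) (s : PySem.Set String) (x : String) :
    x ∈ l.foldl (fun s ranking => PySem.Set.inter s (PySem.Dict.keys ranking)) s
      ↔ x ∈ s ∧ ∀ r ∈ l, x ∈ PySem.Dict.keys r := by
  induction l generalizing s with
  | nil => simp
  | cons r l ih =>
    simp only [List.foldl_cons, ih, PySem.Set.mem_inter]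
    constructor
    · rintro ⟨⟨hs, hr⟩, hl⟩
      refine ⟨hs, fun r' hr' => ?_⟩
      rcases List.mem_cons.mp hr' with rfl | hm
      · exact hr
      · exact hl r' hm
    · rintro ⟨hs, hall⟩
      exact ⟨⟨hs, hall r (by simp)⟩, fun r' h => hall r' (by simp [h])⟩

-- a fold with a guarded insert is a fold over the filtered list
theorem foldl_ite_insert (p : String → Bool) (v : String → List Int) (l : List String)
    (d : PySem.Dict String (List Int)) :
    l.foldl (fun d x => if p x = true then d.insert x (v x) else d) d
      = (l.filter p).foldl (fun d x => d.insert x (v x)) d := by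
  induction l generalizing d with
  | nil => rfl
  | cons x l ih =>
    simp only [List.foldl_cons, List.filter_cons]
    rcases h : p x with _ | _ <;> simp [h, ih]

-- ===== VERDICT (by name: the statement is the Claim_ definition above) =====
theorem merge_rankings_spec : Claim_equal_merge_rankings := by
  intro lr _ hpre
  unfold Spec_merge_rankings
  match lr with
  | [] => exact absurd rfl hpre
  | x :: xs =>
    simp only [merge_rankings, merge_rankings_alt, List.map_cons]
    set ref := PySem.Dict.ofList x with href
    set rest := xs.map PySem.Dict.ofList with hrest
    have hslice : PySem.List.slice (ref :: rest) (some 1) none = rest := by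
      rw [PySem.List.slice_some_none]
      have : PySem.List.clampIdx (ref :: rest).length 1 = 1 := by
        simp [PySem.List.clampIdx]
      rw [this]; rfl
    -- rewrite A into filter form
    rw [foldl_ite_insert]
    congr 2
    apply List.filter_congr
    intro id hid
    rw [Bool.eq_iff_iff]
    rw [hslice, flag_foldl_eq_all, Bool.true_and, PySem.Set.contains_iff, mem_foldl_inter]
    simp only [List.all_eq_true, PySem.Set.mem_ofList]
    constructor
    · intro h
      exact ⟨hid, fun r hr => (PySem.Dict.contains_iff_mem_keys r id).mp (h r hr)⟩
    · intro ⟨_, h⟩ r hr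
      exact (PySem.Dict.contains_iff_mem_keys r id).mpr (h r hr)
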